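-- pv_equiv track=rewrite | github.com/SebastianOsinski/AdventOfCode2017 | Day 6/day6.py | count_redistribution_cycles_to_loop
-- ===== SOURCE A (Python) =====
-- def find_index_of_max(list):
--     max_index = 0
--
--     for i in range(0, len(list)):
--         if list[i] > list[max_index]:
--             max_index = i
--     return max_index
--
-- def redistribute_blocks(banks):
--     max_index = find_index_of_max(banks)
--     max_block = banks[max_index]
--     banks[max_index] = 0
--
--     i = max_index
--     while max_block > 0:
--         i = (i + 1) % len(banks)
--         banks[i] += 1
--         max_block -= 1
--
-- def count_redistribution_cycles_to_loop(banks):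
--     completed_cycles = []
--     should_continue = True
--
--     while should_continue:
--         redistribute_blocks(banks)
--         if banks in completed_cycles:
--             should_continue = False
--             first_occurence = completed_cycles.index(banks)
--         else:
--             completed_cycles.append(list(banks))
--     no_of_cycles = len(completed_cycles) + 1
--     loop_size = no_of_cycles - first_occurence - 1
--     return (no_of_cycles, loop_size)
-- ===== SOURCE B (Python) =====
-- def _redistribute(banks):
--     n = len(banks)
--     m = max(banks)
--     max_index = banks.index(m)
--     banks[max_index] = 0
--     if m > 0:
--         base, rem = divmod(m, n)
--         banks[:] = [b + base for b in banks]
--         for k in range(rem):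
--             banks[(max_index + 1 + k) % n] += 1
--
-- def count_redistribution_cycles_to_loop(banks):
--     seen = {}
--     step = 0
--     while True:
--         _redistribute(banks)
--         step += 1
--         key = tuple(banks)
--         if key in seen:
--             return (step, step - seen[key])
--         seen[key] = step
-- ===== Notes on version B (the rewrite author's own statement) =====
-- stated objective: faster
-- what changed: redistribution is done arithmetically with divmod (zero the max bank, add base to every bank, +1 to the first rem successors) instead of a per-unit while loop, and cycle detection uses a dict state->step instead of a list with 'in' and '.index' linear scans
import Mathlib
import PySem

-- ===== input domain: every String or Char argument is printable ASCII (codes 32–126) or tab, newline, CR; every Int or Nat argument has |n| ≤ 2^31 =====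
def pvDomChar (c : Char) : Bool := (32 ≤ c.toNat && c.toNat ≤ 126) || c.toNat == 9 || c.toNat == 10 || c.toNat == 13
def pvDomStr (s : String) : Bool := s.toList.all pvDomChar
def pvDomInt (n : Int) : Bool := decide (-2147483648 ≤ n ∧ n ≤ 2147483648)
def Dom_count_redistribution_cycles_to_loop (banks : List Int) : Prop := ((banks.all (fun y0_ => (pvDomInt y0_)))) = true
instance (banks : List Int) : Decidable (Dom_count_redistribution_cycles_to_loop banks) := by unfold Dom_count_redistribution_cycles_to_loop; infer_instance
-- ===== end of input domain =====

-- B replaces A's per-unit while-loop redistribution by a divmod closed form and A's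
-- list-scan cycle detection by a dict state->step; A and B mutate `banks` in place the
-- same way, the equivalence proved here is about the return value.

-- Both while-loops run until a state repeats; the ports make this total with the same
-- fuel bound (a count exceeding the number of distinct reachable states; the proof is
-- by induction on the shared fuel, never using its size).
def pvFuel (banks : List Int) : Nat :=
  ((banks.length + 3) * (banks.foldl (fun a b => a + b.natAbs) 0) + 2) ^ banks.length + 2

-- ===== PORT A =====
def find_index_of_max (l : List Int) : Int :=
  (PySem.List.pyRange 0 l.length 1).foldl
    (fun max_index i =>
      if PySem.List.pyGetD l i 0 > PySem.List.pyGetD l max_index 0 then i else max_index) 0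

-- while max_block > 0: i = (i+1) % len(banks); banks[i] += 1; max_block -= 1
def redisLoopA (banks : List Int) (i : Int) (mb : Int) : List Int :=
  if mb > 0 then
    let i' := PySem.Int.mod (i + 1) (banks.length : Int)
    redisLoopA (PySem.List.pySetD banks i' (PySem.List.pyGetD banks i' 0 + 1)) i' (mb - 1)
  else banks
termination_by mb.toNat
decreasing_by simp_wf; omega

def redistribute_blocks (banks : List Int) : List Int :=
  let max_index := find_index_of_max banks
  let max_block := PySem.List.pyGetD banks max_index 0
  let banks := PySem.List.pySetD banks max_index 0
  redisLoopA banks max_index max_block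

def loopA (fuel : Nat) (banks : List Int) (completed : List (List Int)) : List Int :=
  match fuel with
  | 0 => []
  | f + 1 =>
    let banks := redistribute_blocks banks
    if banks ∈ completed then
      let first_occurence : Int := (((PySem.List.index? completed banks).getD 0 : Nat) : Int)
      let no_of_cycles : Int := (completed.length : Int) + 1
      [no_of_cycles, no_of_cycles - first_occurence - 1]
    else loopA f banks (completed ++ [banks])

def count_redistribution_cycles_to_loop (banks : List Int) : List Int :=
  loopA (pvFuel banks) banks []

-- ===== PORT B =====
-- for k in range(t): bs[(i+1+k) % n] += 1
def incrSeq (n i t : Int) (bs : List Int) : List Int :=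
  (PySem.List.pyRange 0 t 1).foldl
    (fun bs k =>
      let j := PySem.Int.mod (i + 1 + k) n
      PySem.List.pySetD bs j (PySem.List.pyGetD bs j 0 + 1)) bs

def redistribute_blocks_alt (banks : List Int) : List Int :=
  let n : Int := (banks.length : Int)
  let m : Int := (PySem.List.max? banks (fun y => y)).getD 0       -- max(banks); banks ≠ [] under Pre_
  let max_index : Int := (((PySem.List.index? banks m).getD 0 : Nat) : Int)   -- banks.index(m)
  let banks := PySem.List.pySetD banks max_index 0
  if m > 0 then
    -- base, rem = divmod(m, n): exact since n ≠ 0 under Pre_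
    let base := PySem.Int.floordiv m n
    let rem := PySem.Int.mod m n
    incrSeq n max_index rem (banks.map (· + base))
  else banks

def loopB (fuel : Nat) (banks : List Int) (seen : PySem.Dict (List Int) Int) (step : Int) :
    List Int :=
  match fuel with
  | 0 => []
  | f + 1 =>
    let banks := redistribute_blocks_alt banks
    let step := step + 1
    match PySem.Dict.get? seen banks with
    | some first => [step, step - first]
    | none => loopB f banks (PySem.Dict.insert seen banks step) step

def count_redistribution_cycles_to_loop_alt (banks : List Int) : List Int :=
  loopB (pvFuel banks) banks PySem.Dict.empty 0

-- ===== PRECONDITION & SPEC =====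
-- Pre_ excludes only the empty list, on which A raises IndexError (and B ValueError).
def Pre_count_redistribution_cycles_to_loop (banks : List Int) : Prop := banks ≠ []
instance (banks : List Int) : Decidable (Pre_count_redistribution_cycles_to_loop banks) := by
  unfold Pre_count_redistribution_cycles_to_loop; infer_instance

def pvWitness_count_redistribution_cycles_to_loop : List Int := [0, 2, 7, 0]

def Spec_count_redistribution_cycles_to_loop (banks : List Int) (out : List Int) : Prop :=
  out = count_redistribution_cycles_to_loop_alt banks
instance (banks : List Int) (out : List Int) :
    Decidable (Spec_count_redistribution_cycles_to_loop banks out) := by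
  unfold Spec_count_redistribution_cycles_to_loop; infer_instance

-- ===== CLAIM (what is proved, stated in full; the proofs are below) =====
def Claim_equal_count_redistribution_cycles_to_loop : Prop :=
  ∀ (banks : List Int), Dom_count_redistribution_cycles_to_loop banks →
    Pre_count_redistribution_cycles_to_loop banks →
    Spec_count_redistribution_cycles_to_loop banks (count_redistribution_cycles_to_loop banks)

-- ===== LEMMAS AND PROOFS =====

-- increment positions one at a time, as a fold over the list of positions
def foldInc (ps : List Int) (bs : List Int) : List Int :=
  ps.foldl (fun bs p => PySem.List.pySetD bs p (PySem.List.pyGetD bs p 0 + 1)) bs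

theorem incrSeq_eq_foldInc (n i t : Int) (bs : List Int) :
    incrSeq n i t bs
      = foldInc ((PySem.List.pyRange 0 t 1).map (fun k => PySem.Int.mod (i + 1 + k) n)) bs := by
  rw [foldInc, List.foldl_map]
  rfl

theorem length_foldInc (ps : List Int) (bs : List Int) :
    (foldInc ps bs).length = bs.length := by
  induction ps generalizing bs with
  | nil => rfl
  | cons p ps ih =>
    rw [foldInc, List.foldl_cons, ← foldInc, ih, PySem.List.length_pySetD]

theorem length_incrSeq (n i t : Int) (bs : List Int) :
    (incrSeq n i t bs).length = bs.length := by
  rw [incrSeq_eq_foldInc, length_foldInc]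

theorem getD_foldInc (ps : List Int) (bs : List Int)
    (hall : ∀ p ∈ ps, 0 ≤ p ∧ p < (bs.length : Int)) (j : Nat) (hj : j < bs.length) :
    (foldInc ps bs).getD j 0 = bs.getD j 0 + ps.count ((j : Int)) := by
  induction ps generalizing bs with
  | nil => simp [foldInc]
  | cons p ps ih =>
    obtain ⟨hp0, hp1⟩ := hall p (List.mem_cons_self ..)
    rw [foldInc, List.foldl_cons, ← foldInc]
    have hset : PySem.List.pySetD bs p (PySem.List.pyGetD bs p 0 + 1)
        = bs.set p.toNat (bs[p.toNat]'(by omega) + 1) := by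
      rw [PySem.List.pySetD_of_nonneg _ _ hp0, PySem.List.pyGetD_eq_getElem _ _ hp0 hp1]
    rw [hset]
    rw [ih _ (by intro q hq; simpa using hall q (List.mem_cons_of_mem _ hq))
      (by simpa using hj)]
    have hgd : (bs.set p.toNat (bs[p.toNat]'(by omega) + 1)).getD j 0
        = bs.getD j 0 + (if ((j : Int) = p) then 1 else 0) := by
      by_cases hjp : j = p.toNat
      · rw [if_pos (show (j : Int) = p by omega)]
        subst hjp
        rw [List.getD_eq_getElem _ _ (by simpa using hj), List.getD_eq_getElem _ _ hj,
            List.getElem_set_self]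
      · rw [if_neg (show ¬ ((j : Int) = p) by omega)]
        rw [List.getD_eq_getElem _ _ (by simpa using hj), List.getD_eq_getElem _ _ hj,
            List.getElem_set_ne (by omega)]
        ring
    rw [hgd, List.count_cons]
    by_cases hc : ((j : Int) = p)
    · rw [if_pos hc, if_pos (beq_iff_eq.mpr hc.symm)]
      push_cast
      ring
    · rw [if_neg hc, if_neg (by simp only [beq_iff_eq]; exact fun h => hc h.symm)]
      push_cast
      ring

theorem count_modRange (nn : Nat) (hnn : 0 < nn) (i : Int) (j : Nat) (hj : j < nn) :
    ((PySem.List.pyRange 0 (nn : Int) 1).map (fun k => (i + 1 + k) % (nn : Int))).count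
      ((j : Int)) = 1 := by
  have hne : (nn : Int) ≠ 0 := by omega
  have hnodup : ((PySem.List.pyRange 0 (nn : Int) 1).map
      (fun k => (i + 1 + k) % (nn : Int))).Nodup := by
    apply List.Nodup.map_on _ (PySem.List.nodup_pyRange_one 0 (nn : Int))
    intro k1 hk1 k2 hk2 heq
    rw [PySem.List.mem_pyRange_one] at hk1 hk2
    rw [Int.emod_eq_emod_iff_emod_sub_eq_zero] at heq
    have hsub : (k1 - k2) % (nn : Int) = 0 := by
      rw [show k1 - k2 = (i + 1 + k1) - (i + 1 + k2) by ring]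
      exact heq
    obtain ⟨c, hc⟩ := Int.dvd_of_emod_eq_zero hsub
    rcases lt_trichotomy c 0 with hc0 | hc0 | hc0
    · nlinarith [hk1.1, hk1.2, hk2.1, hk2.2]
    · rw [hc0, mul_zero] at hc
      omega
    · nlinarith [hk1.1, hk1.2, hk2.1, hk2.2]
  have hmem : (j : Int) ∈ (PySem.List.pyRange 0 (nn : Int) 1).map
      (fun k => (i + 1 + k) % (nn : Int)) := by
    rw [List.mem_map]
    refine ⟨((j : Int) - i - 1) % (nn : Int), ?_, ?_⟩
    · rw [PySem.List.mem_pyRange_one]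
      exact ⟨Int.emod_nonneg _ hne, Int.emod_lt_of_pos _ (by omega)⟩
    · have h1 : (i + 1 + ((j : Int) - i - 1) % (nn : Int)) % (nn : Int)
          = (i + 1 + ((j : Int) - i - 1)) % (nn : Int) := by
        conv_rhs => rw [Int.add_emod]
        rw [Int.add_emod (i + 1), Int.emod_emod_of_dvd _ dvd_rfl]
      rw [h1]
      have h2 : i + 1 + ((j : Int) - i - 1) = (j : Int) := by ring
      rw [h2]
      exact Int.emod_eq_of_lt (by omega) (by omega)
  exact List.count_eq_one_of_mem hnodup hmem

theorem incrSeq_full (nn : Nat) (hnn : 0 < nn) (i : Int) (bs : List Int)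
    (hlen : bs.length = nn) :
    incrSeq (nn : Int) i (nn : Int) bs = bs.map (· + 1) := by
  have hmod : ((PySem.List.pyRange 0 (nn : Int) 1).map
        (fun k => PySem.Int.mod (i + 1 + k) (nn : Int)))
      = (PySem.List.pyRange 0 (nn : Int) 1).map (fun k => (i + 1 + k) % (nn : Int)) := by
    apply List.map_congr_left
    intro k _
    exact PySem.Int.mod_eq_emod_of_pos (by omega)
  have hall : ∀ p ∈ (PySem.List.pyRange 0 (nn : Int) 1).map
      (fun k => (i + 1 + k) % (nn : Int)), 0 ≤ p ∧ p < (bs.length : Int) := by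
    intro p hp
    rw [List.mem_map] at hp
    obtain ⟨k, _, hk⟩ := hp
    subst hk
    rw [hlen]
    exact ⟨Int.emod_nonneg _ (by omega), Int.emod_lt_of_pos _ (by omega)⟩
  apply List.ext_getElem
  · rw [length_incrSeq, List.length_map]
  · intro j hj1 hj2
    have hj1' : j < bs.length := by rw [length_incrSeq] at hj1; exact hj1
    have hgd : (incrSeq (nn : Int) i (nn : Int) bs).getD j 0
        = bs.getD j 0 + 1 := by
      rw [incrSeq_eq_foldInc, hmod, getD_foldInc _ _ hall j hj1',
          count_modRange nn hnn i j (by omega)]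
      norm_num
    rw [List.getElem_map,
        ← List.getD_eq_getElem (incrSeq (nn : Int) i (nn : Int) bs) 0 hj1, hgd,
        List.getD_eq_getElem _ _ hj1']

-- the list of positions hit by `incrSeq n i t`
def posList (n i t : Int) : List Int :=
  (PySem.List.pyRange 0 t 1).map (fun k => PySem.Int.mod (i + 1 + k) n)

theorem incrSeq_eq_posList (n i t : Int) (bs : List Int) :
    incrSeq n i t bs = foldInc (posList n i t) bs :=
  incrSeq_eq_foldInc n i t bs

theorem foldInc_cons (p : Int) (ps : List Int) (bs : List Int) :
    foldInc (p :: ps) bs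
      = foldInc ps (PySem.List.pySetD bs p (PySem.List.pyGetD bs p 0 + 1)) := rfl

theorem foldInc_append (ps qs : List Int) (bs : List Int) :
    foldInc (ps ++ qs) bs = foldInc qs (foldInc ps bs) := by
  simp [foldInc]

theorem posList_cons (n i mb : Int) (hn : 0 < n) (hmb : 0 < mb) :
    posList n i mb
      = PySem.Int.mod (i + 1) n :: posList n (PySem.Int.mod (i + 1) n) (mb - 1) := by
  rw [posList, PySem.List.pyRange_one_cons hmb, List.map_cons]
  congr 1
  · rw [show i + 1 + 0 = i + 1 by ring]
  · rw [show (0 : Int) + 1 = 1 by ring]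
    rw [posList, PySem.List.pyRange_one 1 mb, PySem.List.pyRange_one 0 (mb - 1),
        List.map_map, List.map_map, show mb - 1 - 0 = mb - 1 by ring]
    apply List.map_congr_left
    intro a _
    simp only [Function.comp]
    rw [PySem.Int.mod_eq_emod_of_pos hn, PySem.Int.mod_eq_emod_of_pos hn,
        PySem.Int.mod_eq_emod_of_pos hn]
    rw [show i + 1 + (1 + (a : Int)) = (i + 1) + (1 + a) by ring,
        show (i + 1) % n + 1 + (0 + (a : Int)) = (i + 1) % n + (1 + a) by ring,
        Int.emod_add_emod]

theorem posList_peel (n i t : Int) (hn : 0 < n) (ht : 0 ≤ t) :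
    posList n i (n + t) = posList n i n ++ posList n i t := by
  rw [posList, PySem.List.pyRange_one_append 0 n (n + t) (by omega) (by omega),
      List.map_append]
  congr 1
  rw [posList, PySem.List.pyRange_one n (n + t), PySem.List.pyRange_one 0 t,
      show n + t - n = t - 0 by ring, List.map_map, List.map_map]
  apply List.map_congr_left
  intro a _
  simp only [Function.comp]
  rw [PySem.Int.mod_eq_emod_of_pos hn, PySem.Int.mod_eq_emod_of_pos hn]
  rw [show i + 1 + (n + (a : Int)) = (i + 1 + (0 + a)) + n * 1 by ring,
      Int.add_mul_emod_self_left]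

theorem redisLoopA_eq (t : Nat) : ∀ (mb : Int), mb.toNat ≤ t →
    ∀ (nn : Nat), 0 < nn → ∀ (bs : List Int) (i : Int), bs.length = nn →
    redisLoopA bs i mb = incrSeq (nn : Int) i mb bs := by
  induction t with
  | zero =>
    intro mb hmb nn hnn bs i hlen
    have hmb0 : ¬ mb > 0 := by omega
    rw [redisLoopA, if_neg hmb0, incrSeq, PySem.List.pyRange_one_eq_nil (by omega)]
    rfl
  | succ t ih =>
    intro mb hmb nn hnn bs i hlen
    by_cases hpos : mb > 0
    · rw [redisLoopA, if_pos hpos]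
      rw [incrSeq_eq_posList, posList_cons _ _ _ (by omega) hpos, foldInc_cons,
          ← incrSeq_eq_posList]
      rw [hlen]
      exact ih (mb - 1) (by omega) nn hnn _ _ (by rw [PySem.List.length_pySetD, hlen])
    · rw [redisLoopA, if_neg hpos, incrSeq, PySem.List.pyRange_one_eq_nil (by omega)]
      rfl

theorem incrSeq_divmod (q : Nat) : ∀ (nn : Nat), 0 < nn → ∀ (r i : Int) (bs : List Int),
    0 ≤ r → bs.length = nn →
    incrSeq (nn : Int) i ((q : Int) * nn + r) bs
      = incrSeq (nn : Int) i r (bs.map (· + (q : Int))) := by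
  induction q with
  | zero =>
    intro nn hnn r i bs hr hlen
    rw [show ((0 : Nat) : Int) * nn + r = r by push_cast; ring]
    have hmap : bs.map (· + ((0 : Nat) : Int)) = bs := by simp
    rw [hmap]
  | succ q ih =>
    intro nn hnn r i bs hr hlen
    have hq0 : (0 : Int) ≤ (q : Int) * nn + r := by positivity
    rw [show ((q + 1 : Nat) : Int) * nn + r = (nn : Int) + ((q : Int) * nn + r) by
      push_cast; ring]
    rw [incrSeq_eq_posList, posList_peel _ _ _ (by omega) hq0, foldInc_append,
        ← incrSeq_eq_posList, ← incrSeq_eq_posList,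
        incrSeq_full nn hnn i bs hlen]
    rw [ih nn hnn r i (bs.map (· + 1)) hr (by rw [List.length_map, hlen])]
    congr 1
    rw [List.map_map]
    apply List.map_congr_left
    intro a _
    simp only [Function.comp]
    push_cast
    ring

-- ----- first index of the maximum -----

theorem gMax_char (l : List Int) : ∀ (b : Nat), 0 < b → b ≤ l.length →
    ∃ j : Nat,
      (PySem.List.pyRange 0 (b : Int) 1).foldl
        (fun max_index i =>
          if PySem.List.pyGetD l i 0 > PySem.List.pyGetD l max_index 0 then i else max_index)
        0 = (j : Int)
      ∧ j < b ∧ (∀ i, i < b → l.getD i 0 ≤ l.getD j 0)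
      ∧ (∀ i, i < j → l.getD i 0 < l.getD j 0) := by
  intro b
  induction b with
  | zero => omega
  | succ b ih =>
    intro _ hble
    by_cases hb : b = 0
    · subst hb
      refine ⟨0, ?_, by omega, ?_, by omega⟩
      · rw [show ((0 + 1 : Nat) : Int) = 0 + 1 by norm_num,
            PySem.List.pyRange_one_singleton, List.foldl_cons, List.foldl_nil]
        simp
      · intro i hi
        interval_cases i
        exact le_refl _
    · obtain ⟨j, hj1, hj2, hj3, hj4⟩ := ih (by omega) (by omega)
      rw [show ((b + 1 : Nat) : Int) = (b : Int) + 1 by push_cast; ring,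
          PySem.List.pyRange_one_succ_right (by positivity), List.foldl_append,
          List.foldl_cons, List.foldl_nil, hj1]
      rw [PySem.List.pyGetD_natCast, PySem.List.pyGetD_natCast]
      by_cases hgt : l.getD b 0 > l.getD j 0
      · refine ⟨b, by rw [if_pos hgt], by omega, ?_, ?_⟩
        · intro i hi
          rcases Nat.lt_succ_iff_lt_or_eq.mp hi with hi | hi
          · exact le_trans (hj3 i hi) hgt.le
          · subst hi; exact le_refl _
        · intro i hi
          exact lt_of_le_of_lt (hj3 i hi) hgt
      · refine ⟨j, by rw [if_neg hgt], by omega, ?_, hj4⟩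
        intro i hi
        rcases Nat.lt_succ_iff_lt_or_eq.mp hi with hi | hi
        · exact hj3 i hi
        · subst hi; omega

theorem max_index_eq (l : List Int) (h : l ≠ []) :
    find_index_of_max l
      = (((PySem.List.index? l ((PySem.List.max? l (fun y => y)).getD 0)).getD 0 : Nat)
          : Int) := by
  have hlen : 0 < l.length := List.length_pos_of_ne_nil h
  cases hm : PySem.List.max? l (fun y => y) with
  | none => rw [PySem.List.max?_eq_none_iff] at hm; exact absurd hm h
  | some m0 =>
    have hmem : m0 ∈ l := PySem.List.max?_mem hm
    obtain ⟨k, hk⟩ := Option.isSome_iff_exists.mp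
      ((PySem.List.index?_isSome_iff l m0).mpr hmem)
    obtain ⟨hklen, hkeq, hkfirst⟩ := PySem.List.getElem_of_index?_eq_some hk
    obtain ⟨j, hj1, hj2, hj3, hj4⟩ := gMax_char l l.length hlen (le_refl _)
    have hfind : find_index_of_max l = (j : Int) := hj1
    rw [hfind]
    simp only [Option.getD_some]
    rw [hk]
    simp only [Option.getD_some]
    have hgj : l.getD j 0 = l[j]'hj2 := List.getD_eq_getElem l 0 hj2
    have hgk : l.getD k 0 = l[k]'hklen := List.getD_eq_getElem l 0 hklen
    have hjm : l[j]'hj2 = m0 := by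
      apply le_antisymm
      · exact PySem.List.max?_isMax hm _ (List.getElem_mem hj2)
      · rw [← hkeq, ← hgk, ← hgj]
        exact hj3 k hklen
    have hjk : j = k := by
      rcases lt_trichotomy j k with hlt | heq | hgt
      · exact absurd (hgj ▸ hjm) (hkfirst j hlt)
      · exact heq
      · have h1 : l.getD k 0 < l.getD j 0 := hj4 k hgt
        rw [hgj, hgk, hjm, hkeq] at h1
        exact absurd h1 (lt_irrefl m0)
    rw [hjk]

theorem redistribute_eq (banks : List Int) (h : banks ≠ []) :
    redistribute_blocks banks = redistribute_blocks_alt banks := by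
  have hlen : 0 < banks.length := List.length_pos_of_ne_nil h
  simp only [redistribute_blocks, redistribute_blocks_alt]
  rw [max_index_eq banks h]
  set m0 : Int := (PySem.List.max? banks (fun y => y)).getD 0 with hm0
  set ki : Int := (((PySem.List.index? banks m0).getD 0 : Nat) : Int) with hki
  set bs0 : List Int := PySem.List.pySetD banks ki 0 with hbs0
  have hbs0len : bs0.length = banks.length := PySem.List.length_pySetD ..
  have hget : PySem.List.pyGetD banks ki 0 = m0 := by
    cases hm : PySem.List.max? banks (fun y => y) with
    | none => rw [PySem.List.max?_eq_none_iff] at hm; exact absurd hm h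
    | some mv =>
      have hmem : mv ∈ banks := PySem.List.max?_mem hm
      obtain ⟨k, hk⟩ := Option.isSome_iff_exists.mp
        ((PySem.List.index?_isSome_iff banks mv).mpr hmem)
      obtain ⟨hklen, hkeq, _⟩ := PySem.List.getElem_of_index?_eq_some hk
      rw [hki, hm0, hm]
      simp only [Option.getD_some]
      rw [hk]
      simp only [Option.getD_some]
      rw [PySem.List.pyGetD_natCast, List.getD_eq_getElem banks 0 hklen, hkeq]
  rw [hget]
  by_cases hpos : m0 > 0
  · rw [if_pos hpos]
    rw [redisLoopA_eq m0.toNat m0 (le_refl _) banks.length hlen bs0 ki hbs0len]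
    have hbase0 : 0 ≤ PySem.Int.floordiv m0 (banks.length : Int) := by
      rw [PySem.Int.floordiv_eq_ediv_of_pos (by omega)]
      exact Int.ediv_nonneg (by omega) (by omega)
    have hrem0 : 0 ≤ PySem.Int.mod m0 (banks.length : Int) :=
      PySem.Int.mod_nonneg m0 (by omega)
    have hsplit : m0 = ((PySem.Int.floordiv m0 (banks.length : Int)).toNat : Int)
        * (banks.length : Int) + PySem.Int.mod m0 (banks.length : Int) := by
      rw [Int.toNat_of_nonneg hbase0]
      exact (PySem.Int.floordiv_mul_add_mod m0 (banks.length : Int)).symm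
    calc incrSeq (banks.length : Int) ki m0 bs0
        = incrSeq (banks.length : Int) ki
            (((PySem.Int.floordiv m0 (banks.length : Int)).toNat : Int)
              * (banks.length : Int) + PySem.Int.mod m0 (banks.length : Int)) bs0 := by
          rw [← hsplit]
      _ = incrSeq (banks.length : Int) ki (PySem.Int.mod m0 (banks.length : Int))
            (bs0.map (· + ((PySem.Int.floordiv m0 (banks.length : Int)).toNat : Int))) :=
          incrSeq_divmod _ banks.length hlen _ _ _ hrem0 hbs0len
      _ = incrSeq (banks.length : Int) ki (PySem.Int.mod m0 (banks.length : Int))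
            (bs0.map (· + PySem.Int.floordiv m0 (banks.length : Int))) := by
          rw [Int.toNat_of_nonneg hbase0]
  · rw [if_neg hpos, redisLoopA, if_neg hpos]

theorem length_redistribute_alt (banks : List Int) :
    (redistribute_blocks_alt banks).length = banks.length := by
  simp only [redistribute_blocks_alt]
  split_ifs
  · rw [length_incrSeq, List.length_map, PySem.List.length_pySetD]
  · rw [PySem.List.length_pySetD]

-- the items list that B's `seen` dict holds after recording the states `c`, values from s+1
def itemsFrom (c : List (List Int)) (s : Int) : List (List Int × Int) :=
  match c with
  | [] => []
  | x :: t => (x, s + 1) :: itemsFrom t (s + 1)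

theorem itemsFrom_get? (c : List (List Int)) (s : Int) (b : List Int) :
    (PySem.Dict.mk (itemsFrom c s)).get? b
      = Option.map (fun k : Nat => s + (k : Int) + 1) (PySem.List.index? c b) := by
  induction c generalizing s with
  | nil => simp [itemsFrom, PySem.List.index?_eq_idxOf?, PySem.Dict.get?]
  | cons x t ih =>
    rw [itemsFrom, PySem.Dict.get?_mk_cons]
    by_cases hx : x = b
    · subst hx
      rw [PySem.List.index?_cons_self]
      simp
    · rw [PySem.List.index?_cons_of_ne _ hx, ih]
      simp only [beq_iff_eq, if_neg hx, Option.map_map]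
      congr 1
      funext k
      simp only [Function.comp]
      push_cast
      ring

theorem itemsFrom_fst (c : List (List Int)) (s : Int) :
    (itemsFrom c s).map (·.1) = c := by
  induction c generalizing s with
  | nil => rfl
  | cons x t ih => simp [itemsFrom, ih]

theorem itemsFrom_append (c : List (List Int)) (b : List Int) (s : Int) :
    itemsFrom (c ++ [b]) s = itemsFrom c s ++ [(b, s + c.length + 1)] := by
  induction c generalizing s with
  | nil => simp [itemsFrom]
  | cons x t ih =>
    simp only [List.cons_append, itemsFrom, ih, List.length_cons]
    have : s + 1 + (t.length : Int) + 1 = s + ((t.length : Int) + 1) + 1 := by ring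
    rw [this]
    push_cast
    ring_nf

theorem loop_invariant (f : Nat) (banks : List Int) (c : List (List Int))
    (h : banks ≠ []) :
    loopA f banks c = loopB f banks (PySem.Dict.mk (itemsFrom c 0)) (c.length : Int) := by
  induction f generalizing banks c with
  | zero => rfl
  | succ f ih =>
    rw [loopA, loopB, redistribute_eq banks h]
    set b' := redistribute_blocks_alt banks with hb'
    have hb'len : b'.length = banks.length := length_redistribute_alt banks
    have hb'ne : b' ≠ [] := by
      intro hnil
      rw [hnil] at hb'len
      exact h (List.length_eq_zero_iff.mp hb'len.symm)
    rw [itemsFrom_get? c 0 b']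
    by_cases hmem : b' ∈ c
    · rw [if_pos hmem]
      obtain ⟨k, hk⟩ := Option.isSome_iff_exists.mp
        ((PySem.List.index?_isSome_iff c b').mpr hmem)
      rw [hk]
      simp only [Option.map_some, Option.getD_some]
      have h2 : (c.length : Int) + 1 - (0 + (k : Int) + 1) = (c.length : Int) + 1 - k - 1 := by
        ring
      rw [h2]
    · rw [if_neg hmem]
      rw [(PySem.List.index?_eq_none_iff c b').mpr hmem]
      simp only [Option.map_none]
      have hins : (PySem.Dict.mk (itemsFrom c 0)).insert b' ((c.length : Int) + 1)
          = PySem.Dict.mk (itemsFrom (c ++ [b']) 0) := by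
        apply PySem.Dict.ext
        rw [PySem.Dict.items_insert_of_not_contains, itemsFrom_append]
        · simp
        · have : b' ∉ (PySem.Dict.mk (itemsFrom c 0)).keys := by
            rw [PySem.Dict.keys]
            simpa [PySem.Dict.items, itemsFrom_fst] using hmem
          rw [← Bool.not_eq_true]
          intro hcon
          exact this ((PySem.Dict.contains_iff_mem_keys _ _).mp hcon)
      rw [hins]
      have hlen : ((c ++ [b']).length : Int) = (c.length : Int) + 1 := by
        simp
      rw [← hlen]
      exact (ih b' (c ++ [b']) hb'ne).symm ▸ rfl

theorem main_loop_eq (f : Nat) (banks : List Int) (h : banks ≠ []) :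
    loopA f banks [] = loopB f banks PySem.Dict.empty 0 := by
  have := loop_invariant f banks [] h
  simpa [itemsFrom, PySem.Dict.empty] using this

-- ===== VERDICT (by name: the statement is the Claim_ definition above) =====
theorem count_redistribution_cycles_to_loop_spec :
    Claim_equal_count_redistribution_cycles_to_loop := by
  intro banks _hdom hpre
  unfold Spec_count_redistribution_cycles_to_loop
  unfold count_redistribution_cycles_to_loop count_redistribution_cycles_to_loop_alt
  exact main_loop_eq (pvFuel banks) banks hpre
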